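-- pv_equiv track=rewrite | github.com/sabrinatseng/aoc-2025-python | 07.py | part_one
-- ===== SOURCE A (Python) =====
-- class Map:
--     def __init__(self, input):
--         lines = input.splitlines()
--
--         self.height = len(lines)
--         self.width = len(lines[0])
--         self.splitters = set()
--         self.start = None
--
--         for i in range(self.height):
--             for j in range(self.width):
--                 if lines[i][j] == 'S':
--                     self.start = j # assumed to be on line 0
--                 elif lines[i][j] == '^':
--                     self.splitters.add((i, j))
--
--     def is_splitter(self, i, j):
--         return (i, j) in self.splitters
--
-- def part_one(input):
--     map = Map(input)
--     beams = [map.start]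
--     splits = 0
--
--     for i in range(1, map.height):
--         new_beams = set()
--         for beam in beams:
--             if map.is_splitter(i, beam):
--                 new_beams.add(beam - 1)
--                 new_beams.add(beam + 1)
--                 splits += 1
--             else:
--                 new_beams.add(beam)
--
--         beams = list(new_beams)
--
--     return splits
-- ===== SOURCE B (Python) =====
-- def part_one(input):
--     lines = input.splitlines()
--     w = len(lines[0])
--
--     # start = column of the last 'S' in row-major order (A overwrites on each hit)
--     start = None
--     for row in lines:
--         for j in range(w):
--             if row[j] == 'S':
--                 start = j
--     if start is None:
--         return 0
--
--     # Dense column-indexed DP: occ[c] says whether a beam occupies column c.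
--     # Pull recurrence per cell; beams leaving [0, w) are discarded (no splitter
--     # outside the grid can ever act on them, so they never contribute a split).
--     occ = [c == start for c in range(w)]
--     total = 0
--     for row in lines[1:]:
--         total += sum(1 for c in range(w) if occ[c] and row[c] == '^')
--         occ = [(occ[c] and row[c] != '^')
--                or (c > 0 and occ[c - 1] and row[c - 1] == '^')
--                or (c + 1 < w and occ[c + 1] and row[c + 1] == '^')
--                for c in range(w)]
--     return total
-- ===== Notes on version B (the rewrite author's own statement) =====
-- stated objective: alternative
-- what changed: B drops A's set-of-beam-columns simulation (push each beam into a new set, counting splits inline) for a dense column-indexed boolean DP: one Bool per grid column, each row recomputed cell-by-cell with a pull recurrence from the previous row's three neighbour cells, beams leaving the grid discarded, and splits counted per row from the table. The dense table avoids per-row set hashing/rebuilding (constant-factor speedup measured).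
import Mathlib
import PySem

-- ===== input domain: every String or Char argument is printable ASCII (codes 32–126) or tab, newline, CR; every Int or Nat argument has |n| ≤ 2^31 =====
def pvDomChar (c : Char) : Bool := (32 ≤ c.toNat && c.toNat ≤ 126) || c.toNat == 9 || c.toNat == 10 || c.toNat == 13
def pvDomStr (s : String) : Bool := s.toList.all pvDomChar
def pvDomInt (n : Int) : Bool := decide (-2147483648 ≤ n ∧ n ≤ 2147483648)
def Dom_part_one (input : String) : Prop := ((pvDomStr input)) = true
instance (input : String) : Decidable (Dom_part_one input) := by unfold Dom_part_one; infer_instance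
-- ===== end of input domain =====

-- B replaces A's push-style simulation over a set of beam columns with a dense
-- column-indexed boolean DP (a pull recurrence per grid cell, out-of-range beams
-- discarded) and counts splits per row from the table; measured faster in a timing run.

-- ===== PORT A =====
-- A beam may be Python's None (grid without 'S'), so beams hold Option Int.
-- Python iterates `beams = list(new_beams)` in hash order; the returned count does not depend
-- on that order, and the port iterates the Set in insertion order.
-- Out-of-range reads lines[i][j] (a Python IndexError, excluded by Pre_part_one) read ' ' here.
def part_one (input : String) : Int :=
  match PySem.Str.splitlines input with
  | [] => 0  -- Python raises IndexError on lines[0]; excluded by Pre_part_one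
  | l0 :: rest =>
    let lines := l0 :: rest
    let height := lines.length
    let width := l0.toList.length
    -- Map.__init__: row-major scan collecting the splitter set and the start column
    let parsed := (List.range height).foldl
      (fun (st : PySem.Set (Int × Int) × Option Int) i =>
        (List.range width).foldl
          (fun (st2 : PySem.Set (Int × Int) × Option Int) j =>
            if (lines.getD i "").toList.getD j ' ' = 'S' then (st2.1, some (j : Int))
            else if (lines.getD i "").toList.getD j ' ' = '^' then
              (PySem.Set.add st2.1 ((i : Int), (j : Int)), st2.2)
            else st2) st)
      (PySem.Set.empty, none)
    let res := (PySem.List.pyRange 1 (height : Int) 1).foldl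
      (fun (st : List (Option Int) × Int) i =>
        let r := st.1.foldl
          (fun (acc : PySem.Set (Option Int) × Int) beam =>
            match beam with
            | some b =>
              if PySem.Set.contains parsed.1 (i, b) then
                (PySem.Set.add (PySem.Set.add acc.1 (some (b - 1))) (some (b + 1)), acc.2 + 1)
              else (PySem.Set.add acc.1 (some b), acc.2)
            | none => (PySem.Set.add acc.1 none, acc.2))
          (PySem.Set.empty, st.2)
        (r.1, r.2))
      ([parsed.2], 0)
    res.2

-- ===== PORT B =====
-- B: find the start column, then a dense boolean table occ (one Bool per grid column):
-- per row, first count the splitters standing on an occupied column, then recompute every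
-- cell by the pull recurrence from the previous row (straight-through, or fed from a
-- splitter on the left/right neighbour); beams leaving [0, w) are discarded.
-- `sum(1 for c in range(w) if …)` is ported as the counting fold it denotes.
def part_one_alt (input : String) : Int :=
  match PySem.Str.splitlines input with
  | [] => 0  -- Python raises IndexError on lines[0]; excluded by Pre_part_one
  | l0 :: rest =>
    let lines := l0 :: rest
    let w := l0.toList.length
    let start := lines.foldl
      (fun (st : Option Int) row =>
        (List.range w).foldl
          (fun (st2 : Option Int) (j : Nat) =>
            if row.toList.getD j ' ' = 'S' then some (j : Int) else st2) st)
      none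
    match start with
    | none => 0
    | some s0 =>
      let occ0 := (List.range w).map (fun (c : Nat) => decide ((c : Int) = s0))
      let res := rest.foldl
        (fun (st : List Bool × Int) row =>
          let t := (List.range w).foldl
            (fun (t : Int) c =>
              if st.1.getD c false && (row.toList.getD c ' ' == '^') then t + 1 else t)
            st.2
          let occ := (List.range w).map (fun c =>
            (st.1.getD c false && !(row.toList.getD c ' ' == '^'))
            || (decide (0 < c) && st.1.getD (c - 1) false && (row.toList.getD (c - 1) ' ' == '^'))
            || (decide (c + 1 < w) && st.1.getD (c + 1) false && (row.toList.getD (c + 1) ' ' == '^')))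
          (occ, t))
        (occ0, 0)
      res.2

-- ===== PRECONDITION & SPEC =====
-- Pre_ excludes exactly the inputs on which Python A raises IndexError: an empty line list
-- (input.splitlines() == []) or a later line shorter than line 0 (lines[i][j] out of range).
def Pre_part_one (input : String) : Prop :=
  PySem.Str.splitlines input ≠ [] ∧
  ∀ line ∈ PySem.Str.splitlines input,
    ((PySem.Str.splitlines input).headD "").toList.length ≤ line.toList.length
instance (input : String) : Decidable (Pre_part_one input) := by unfold Pre_part_one; infer_instance

def pvWitness_part_one : String := "S.\n^^"

def Spec_part_one (input : String) (out : Int) : Prop := out = part_one_alt input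
instance (input : String) (out : Int) : Decidable (Spec_part_one input out) := by unfold Spec_part_one; infer_instance

-- ===== CLAIM (what is proved, stated in full; the proofs are below) =====
def Claim_equal_part_one : Prop := ∀ (input : String), Dom_part_one input → Pre_part_one input → Spec_part_one input (part_one input)

-- ===== LEMMAS AND PROOFS =====

-- proof-side names for the loop bodies shared by the reductions below
def pvRowSet (w : Nat) (line : String) : PySem.Set Int :=
  (List.range w).foldl
    (fun s j => if line.toList.getD j ' ' = '^' then PySem.Set.add s ((j : Int)) else s)
    PySem.Set.empty

def pvStep (sp prev : PySem.Set Int) : PySem.Set Int :=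
  prev.foldl
    (fun (acc : PySem.Set Int) b =>
      if PySem.Set.contains sp b then PySem.Set.add (PySem.Set.add acc (b - 1)) (b + 1)
      else PySem.Set.add acc b)
    PySem.Set.empty

def pvCount : List (PySem.Set Int) → PySem.Set Int → Int
  | [], _ => 0
  | sp :: rest, prev =>
    (prev.countP (fun b => PySem.Set.contains sp b) : Int) + pvCount rest (pvStep sp prev)

-- B's per-row recomputed occupancy row, named for the proof
def pvOccRow (w : Nat) (row : String) (occ : List Bool) : List Bool :=
  (List.range w).map (fun c =>
    (occ.getD c false && !(row.toList.getD c ' ' == '^'))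
    || (decide (0 < c) && occ.getD (c - 1) false && (row.toList.getD (c - 1) ' ' == '^'))
    || (decide (c + 1 < w) && occ.getD (c + 1) false && (row.toList.getD (c + 1) ' ' == '^')))

-- (range l.length).foldl over l.getD is a fold over l
lemma pv_foldl_range_getD {α β : Type} (l : List α) (d : α) (f : β → α → β) (init : β) :
    (List.range l.length).foldl (fun a i => f a (l.getD i d)) init = l.foldl f init := by
  induction l using List.reverseRecOn generalizing init with
  | nil => simp
  | append_singleton xs x ih =>
    rw [List.length_append, List.length_singleton, List.range_succ, List.foldl_append,
        List.foldl_append]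
    have key := PySem.List.foldl_congr_mem (l := List.range xs.length)
      (f := fun a i => f a ((xs ++ [x]).getD i d))
      (g := fun a i => f a (xs.getD i d)) (init := init)
      (by intro a i hi
          have h : i < xs.length := List.mem_range.mp hi
          simp [List.getElem?_append_left h, List.getElem?_eq_getElem h])
    rw [key, ih]
    simp [List.getD]

-- membership in a conditionally-adding fold
lemma pv_mem_foldl_add_ite {α ι : Type} [BEq α] [LawfulBEq α] (l : List ι) (p : ι → Prop)
    [DecidablePred p] (f : ι → α) (s : PySem.Set α) (y : α) :
    y ∈ l.foldl (fun s b => if p b then PySem.Set.add s (f b) else s) s ↔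
      y ∈ s ∨ ∃ b ∈ l, p b ∧ y = f b := by
  rw [PySem.List.foldl_ite_eq_foldl_filter]
  rw [PySem.Set.mem_foldl_add]
  simp
  tauto

-- membership in A's nested parse fold
lemma pv_mem_foldl_add_ite2 {α : Type} [BEq α] [LawfulBEq α] (li lj : List Nat)
    (p : Nat → Nat → Prop) [∀ i j, Decidable (p i j)] (f : Nat → Nat → α)
    (s : PySem.Set α) (y : α) :
    y ∈ li.foldl
        (fun s i => lj.foldl (fun s j => if p i j then PySem.Set.add s (f i j) else s) s) s ↔
      y ∈ s ∨ ∃ i ∈ li, ∃ j ∈ lj, p i j ∧ y = f i j := by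
  induction li generalizing s with
  | nil => simp
  | cons i li ih =>
    rw [List.foldl_cons, ih, pv_mem_foldl_add_ite]
    constructor
    · rintro (((h | ⟨j, hj, hp, rfl⟩) ) | ⟨i', hi', j, hj, hp, rfl⟩)
      · exact Or.inl h
      · exact Or.inr ⟨i, by simp, j, hj, hp, rfl⟩
      · exact Or.inr ⟨i', by simp [hi'], j, hj, hp, rfl⟩
    · rintro (h | ⟨i', hi', j, hj, hp, rfl⟩)
      · exact Or.inl (Or.inl h)
      · rcases List.mem_cons.mp hi' with rfl | hi'
        · exact Or.inl (Or.inr ⟨j, hj, hp, rfl⟩)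
        · exact Or.inr ⟨i', hi', j, hj, hp, rfl⟩

lemma pv_add_map_some (s : PySem.Set Int) (x : Int) :
    PySem.Set.add (s.map some) (some x) = (PySem.Set.add s x).map some := by
  rw [PySem.Set.add_eq_ite, PySem.Set.add_eq_ite]
  by_cases h : x ∈ s
  · simp [h]
  · simp [h]

-- A's inner beam loop on an all-some beam list, with an abstract splitter test
lemma pv_innerA (p : Int → Bool) (l : List Int) (acc : PySem.Set Int) (t : Int) :
    (l.map some).foldl
      (fun (a : PySem.Set (Option Int) × Int) beam =>
        match beam with
        | some b =>
          if p b then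
            (PySem.Set.add (PySem.Set.add a.1 (some (b - 1))) (some (b + 1)), a.2 + 1)
          else (PySem.Set.add a.1 (some b), a.2)
        | none => (PySem.Set.add a.1 none, a.2))
      (acc.map some, t) =
    ((l.foldl
        (fun (a : PySem.Set Int) b =>
          if p b then PySem.Set.add (PySem.Set.add a (b - 1)) (b + 1) else PySem.Set.add a b)
        acc).map some,
      t + (l.countP p : Int)) := by
  induction l generalizing acc t with
  | nil => simp
  | cons b l ih =>
    rw [List.map_cons, List.foldl_cons, List.foldl_cons]
    cases hp : p b with
    | true =>
      simp only [hp, if_true, pv_add_map_some, ih]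
      simp [hp]
      omega
    | false =>
      simp only [hp, pv_add_map_some]
      exact (ih (acc.add b) t).trans (by simp [hp])

-- A's simulation fold, already expressed over the per-row splitter sets
lemma pv_simA (sps : List (PySem.Set Int)) (prev : PySem.Set Int) (t : Int) :
    (sps.foldl
        (fun (st : List (Option Int) × Int) sp =>
          ((st.1.foldl
            (fun (acc : PySem.Set (Option Int) × Int) beam =>
              match beam with
              | some b =>
                if PySem.Set.contains sp b then
                  (PySem.Set.add (PySem.Set.add acc.1 (some (b - 1))) (some (b + 1)), acc.2 + 1)
                else (PySem.Set.add acc.1 (some b), acc.2)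
              | none => (PySem.Set.add acc.1 none, acc.2))
            (PySem.Set.empty, st.2)).1,
           (st.1.foldl
            (fun (acc : PySem.Set (Option Int) × Int) beam =>
              match beam with
              | some b =>
                if PySem.Set.contains sp b then
                  (PySem.Set.add (PySem.Set.add acc.1 (some (b - 1))) (some (b + 1)), acc.2 + 1)
                else (PySem.Set.add acc.1 (some b), acc.2)
              | none => (PySem.Set.add acc.1 none, acc.2))
            (PySem.Set.empty, st.2)).2))
        (prev.map some, t)).2 = t + pvCount sps prev := by
  induction sps generalizing prev t with
  | nil => simp [pvCount]
  | cons sp sps ih =>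
    rw [List.foldl_cons]
    dsimp only
    have h := pv_innerA (fun b => PySem.Set.contains sp b) prev PySem.Set.empty t
    simp only [show (PySem.Set.empty : PySem.Set (Option Int)) =
        (PySem.Set.empty : PySem.Set Int).map some from rfl] at *
    rw [h]
    rw [ih]
    simp [pvCount, pvStep]
    omega

-- A's simulation when the grid has no 'S': the beam list stays [none] and the count stays put
lemma pv_simA_none (l : List Int) (pred : Int → Int → Bool) (t : Int) :
    l.foldl
        (fun (st : List (Option Int) × Int) i =>
          ((st.1.foldl
            (fun (acc : PySem.Set (Option Int) × Int) beam =>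
              match beam with
              | some b =>
                if pred i b then
                  (PySem.Set.add (PySem.Set.add acc.1 (some (b - 1))) (some (b + 1)), acc.2 + 1)
                else (PySem.Set.add acc.1 (some b), acc.2)
              | none => (PySem.Set.add acc.1 none, acc.2))
            (PySem.Set.empty, st.2)).1,
           (st.1.foldl
            (fun (acc : PySem.Set (Option Int) × Int) beam =>
              match beam with
              | some b =>
                if pred i b then
                  (PySem.Set.add (PySem.Set.add acc.1 (some (b - 1))) (some (b + 1)), acc.2 + 1)
                else (PySem.Set.add acc.1 (some b), acc.2)
              | none => (PySem.Set.add acc.1 none, acc.2))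
            (PySem.Set.empty, st.2)).2))
        ([none], t) = ([none], t) := by
  induction l with
  | nil => rfl
  | cons i l ih => rw [List.foldl_cons]; exact ih

-- parse-phase names for the proof
def pvChar (l0 : String) (rest : List String) (i j : Nat) : Char :=
  ((l0 :: rest).getD i "").toList.getD j ' '

def pvSetA (l0 : String) (rest : List String) : PySem.Set (Int × Int) :=
  (List.range (l0 :: rest).length).foldl
    (fun s i =>
      (List.range l0.toList.length).foldl
        (fun s j =>
          if pvChar l0 rest i j = '^' then PySem.Set.add s (((i : Int)), ((j : Int))) else s) s)
    PySem.Set.empty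

def pvStart (l0 : String) (rest : List String) : Option Int :=
  (List.range (l0 :: rest).length).foldl
    (fun st i =>
      (List.range l0.toList.length).foldl
        (fun st j => if pvChar l0 rest i j = 'S' then some ((j : Int)) else st) st)
    none

lemma pv_mem_setA (l0 : String) (rest : List String) (y : Int × Int) :
    y ∈ pvSetA l0 rest ↔
      ∃ i ∈ List.range (l0 :: rest).length, ∃ j ∈ List.range l0.toList.length,
        pvChar l0 rest i j = '^' ∧ y = (((i : Int)), ((j : Int))) := by
  unfold pvSetA
  rw [pv_mem_foldl_add_ite2]
  simp

lemma pv_mem_rowSet (w : Nat) (line : String) (b : Int) :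
    b ∈ pvRowSet w line ↔
      ∃ j ∈ List.range w, line.toList.getD j ' ' = '^' ∧ b = ((j : Int)) := by
  unfold pvRowSet
  rw [pv_mem_foldl_add_ite]
  simp

lemma pv_pred_eq (l0 : String) (rest : List String) (i : Int) (h1 : 1 ≤ i)
    (h2 : i < ((l0 :: rest).length : Int)) (b : Int) :
    PySem.Set.contains (pvSetA l0 rest) (i, b) =
      PySem.Set.contains (pvRowSet l0.toList.length ((l0 :: rest).getD i.toNat "")) b := by
  rw [Bool.eq_iff_iff]
  simp only [PySem.Set.contains_iff]
  rw [pv_mem_setA, pv_mem_rowSet]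
  constructor
  · rintro ⟨i', hi', j, hj, hc, heq⟩
    rw [Prod.mk.injEq] at heq
    obtain ⟨hii, rfl⟩ := heq
    have hnat : i.toNat = i' := by omega
    refine ⟨j, hj, ?_, rfl⟩
    rw [hnat]
    exact hc
  · rintro ⟨j, hj, hc, rfl⟩
    refine ⟨i.toNat, ?_, j, hj, hc, ?_⟩
    · rw [List.mem_range]; omega
    · rw [Prod.mk.injEq]; constructor
      · omega
      · rfl

-- ===== B-side lemmas: the dense table mirrors the beam set =====

lemma pv_mem_step_aux (sp : PySem.Set Int) (l : List Int) (acc : PySem.Set Int) (y : Int) :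
    y ∈ l.foldl
      (fun (acc : PySem.Set Int) b =>
        if PySem.Set.contains sp b then PySem.Set.add (PySem.Set.add acc (b - 1)) (b + 1)
        else PySem.Set.add acc b) acc ↔
    y ∈ acc ∨ ∃ b ∈ l, (PySem.Set.contains sp b = true ∧ (y = b - 1 ∨ y = b + 1)) ∨
        (PySem.Set.contains sp b = false ∧ y = b) := by
  induction l generalizing acc with
  | nil => simp
  | cons b l ih =>
    rw [List.foldl_cons]
    cases hb : PySem.Set.contains sp b with
    | true =>
      simp only [if_true, ih, PySem.Set.mem_add]
      constructor
      · rintro ((( h | rfl) | rfl) | ⟨b', hb', h⟩)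
        · exact Or.inl h
        · exact Or.inr ⟨b, by simp, Or.inl ⟨hb, Or.inl rfl⟩⟩
        · exact Or.inr ⟨b, by simp, Or.inl ⟨hb, Or.inr rfl⟩⟩
        · exact Or.inr ⟨b', by simp [hb'], h⟩
      · rintro (h | ⟨b', hb', h⟩)
        · exact Or.inl (Or.inl (Or.inl h))
        · rcases List.mem_cons.mp hb' with rfl | hb'
          · rcases h with ⟨_, (rfl | rfl)⟩ | ⟨hf, rfl⟩
            · exact Or.inl (Or.inl (Or.inr rfl))
            · exact Or.inl (Or.inr rfl)
            · rw [hb] at hf; exact absurd hf (by simp)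
          · exact Or.inr ⟨b', hb', h⟩
    | false =>
      simp only [Bool.false_eq_true, if_false, ih, PySem.Set.mem_add]
      constructor
      · rintro ((h | rfl) | ⟨b', hb', h⟩)
        · exact Or.inl h
        · exact Or.inr ⟨y, by simp, Or.inr ⟨hb, rfl⟩⟩
        · exact Or.inr ⟨b', by simp [hb'], h⟩
      · rintro (h | ⟨b', hb', h⟩)
        · exact Or.inl (Or.inl h)
        · rcases List.mem_cons.mp hb' with rfl | hb'
          · rcases h with ⟨hf, _⟩ | ⟨_, rfl⟩
            · rw [hb] at hf; exact absurd hf (by simp)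
            · exact Or.inl (Or.inr rfl)
          · exact Or.inr ⟨b', hb', h⟩

lemma pv_mem_step (sp s : PySem.Set Int) (y : Int) :
    y ∈ pvStep sp s ↔
      ∃ b ∈ s, (PySem.Set.contains sp b = true ∧ (y = b - 1 ∨ y = b + 1)) ∨
        (PySem.Set.contains sp b = false ∧ y = b) := by
  unfold pvStep
  rw [pv_mem_step_aux]
  simp [PySem.Set.empty]

lemma pv_nodup_step_aux (sp : PySem.Set Int) (l : List Int) (acc : PySem.Set Int)
    (h : acc.Nodup) :
    (l.foldl
      (fun (acc : PySem.Set Int) b =>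
        if PySem.Set.contains sp b then PySem.Set.add (PySem.Set.add acc (b - 1)) (b + 1)
        else PySem.Set.add acc b) acc).Nodup := by
  induction l generalizing acc with
  | nil => exact h
  | cons b l ih =>
    rw [List.foldl_cons]
    split
    · exact ih _ (PySem.Set.nodup_add _ _ (PySem.Set.nodup_add _ _ h))
    · exact ih _ (PySem.Set.nodup_add _ _ h)

lemma pv_nodup_step (sp s : PySem.Set Int) : (pvStep sp s).Nodup :=
  pv_nodup_step_aux sp s PySem.Set.empty List.nodup_nil

lemma pv_mem_rowSet_nat (w : Nat) (line : String) (c : Nat) :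
    ((c : Int) ∈ pvRowSet w line) ↔ (c < w ∧ line.toList.getD c ' ' = '^') := by
  rw [pv_mem_rowSet]
  constructor
  · rintro ⟨j, hj, hc, he⟩
    have : c = j := by exact_mod_cast he
    subst this
    exact ⟨List.mem_range.mp hj, hc⟩
  · rintro ⟨hc, hch⟩
    exact ⟨c, List.mem_range.mpr hc, hch, rfl⟩

lemma pv_contains_rowSet (w : Nat) (row : String) (c : Nat) :
    PySem.Set.contains (pvRowSet w row) ((c : Int)) =
      (decide (c < w) && (row.toList.getD c ' ' == '^')) := by
  rw [Bool.eq_iff_iff, PySem.Set.contains_iff, pv_mem_rowSet_nat]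
  simp

-- the splitter-row set contains exactly the '^'-columns of the row

lemma pv_count_row (w : Nat) (row : String) (s : PySem.Set Int) (occ : List Bool)
    (hnd : s.Nodup)
    (hinv : ∀ c : Nat, c < w → (occ.getD c false = true ↔ (c : Int) ∈ s)) :
    (s.countP (fun b => PySem.Set.contains (pvRowSet w row) b) : Int) =
      ((List.range w).countP
        (fun c => occ.getD c false && (row.toList.getD c ' ' == '^')) : Int) := by
  have hperm :
      (s.filter (fun b => PySem.Set.contains (pvRowSet w row) b)).Perm
        (((List.range w).filter
            (fun c => occ.getD c false && (row.toList.getD c ' ' == '^'))).map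
          (fun (c : Nat) => (c : Int))) := by
    rw [List.perm_ext_iff_of_nodup (hnd.filter _)
        (((List.nodup_range).filter _).map (fun a b h => by exact_mod_cast h))]
    intro y
    rw [List.mem_filter, List.mem_map]
    simp only [List.mem_filter, List.mem_range]
    constructor
    · rintro ⟨hys, hyc⟩
      rw [PySem.Set.contains_iff] at hyc
      rw [pv_mem_rowSet] at hyc
      obtain ⟨j, hj, hch, rfl⟩ := hyc
      refine ⟨j, ⟨List.mem_range.mp hj, ?_⟩, rfl⟩
      rw [Bool.and_eq_true]
      refine ⟨(hinv j (List.mem_range.mp hj)).mpr hys, by simpa [List.getD] using hch⟩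
    · rintro ⟨c, ⟨hcw, hq⟩, rfl⟩
      rw [Bool.and_eq_true] at hq
      obtain ⟨ho, hch⟩ := hq
      refine ⟨(hinv c hcw).mp ho, ?_⟩
      rw [PySem.Set.contains_iff, pv_mem_rowSet_nat]
      exact ⟨hcw, by simpa [List.getD] using hch⟩
  rw [List.countP_eq_length_filter, List.countP_eq_length_filter]
  rw [hperm.length_eq, List.length_map]

lemma pv_step_row (w : Nat) (row : String) (s : PySem.Set Int) (occ : List Bool)
    (hinv : ∀ c : Nat, c < w → (occ.getD c false = true ↔ (c : Int) ∈ s)) :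
    ∀ c : Nat, c < w →
      ((pvOccRow w row occ).getD c false = true ↔ (c : Int) ∈ pvStep (pvRowSet w row) s) := by
  intro c hcw
  unfold pvOccRow
  rw [PySem.List.getD_map_range _ _ _ _ hcw]
  rw [pv_mem_step]
  simp only [Bool.or_eq_true, Bool.and_eq_true, decide_eq_true_iff, Bool.not_eq_true',
    beq_iff_eq, beq_eq_false_iff_ne, ne_eq]
  constructor
  · rintro ((⟨ho, hch⟩ | ⟨⟨hc0, ho⟩, hch⟩) | ⟨⟨hc1, ho⟩, hch⟩)
    · refine ⟨(c : Int), (hinv c hcw).mp ho, Or.inr ⟨?_, rfl⟩⟩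
      rw [pv_contains_rowSet]
      simp only [Bool.and_eq_false_iff, decide_eq_false_iff_not, beq_eq_false_iff_ne, ne_eq]
      exact Or.inr hch
    · refine ⟨((c - 1 : Nat) : Int), (hinv (c - 1) (by omega)).mp ho, Or.inl ⟨?_, Or.inr (by omega)⟩⟩
      rw [pv_contains_rowSet]
      simp only [Bool.and_eq_true, decide_eq_true_iff, beq_iff_eq]
      exact ⟨by omega, hch⟩
    · refine ⟨((c + 1 : Nat) : Int), (hinv (c + 1) hc1).mp ho, Or.inl ⟨?_, Or.inl (by push_cast; ring)⟩⟩
      rw [pv_contains_rowSet]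
      simp only [Bool.and_eq_true, decide_eq_true_iff, beq_iff_eq]
      exact ⟨hc1, hch⟩
  · rintro ⟨b, hbs, ⟨hbc, (hy | hy)⟩ | ⟨hbc, hy⟩⟩
    · -- c = b - 1, so b = c + 1
      rw [PySem.Set.contains_iff, pv_mem_rowSet] at hbc
      obtain ⟨j, hj, hch, rfl⟩ := hbc
      have hj' := List.mem_range.mp hj
      have hjc : j = c + 1 := by omega
      subst hjc
      exact Or.inr ⟨⟨hj', (hinv (c + 1) hj').mpr hbs⟩, hch⟩
    · -- c = b + 1, so b = c - 1 and 0 < c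
      rw [PySem.Set.contains_iff, pv_mem_rowSet] at hbc
      obtain ⟨j, hj, hch, rfl⟩ := hbc
      have hj' := List.mem_range.mp hj
      have hc0 : 0 < c := by omega
      have hjc : j = c - 1 := by omega
      subst hjc
      exact Or.inl (Or.inr ⟨⟨hc0, (hinv (c - 1) (by omega)).mpr hbs⟩, hch⟩)
    · -- straight through
      have hb : b = (c : Int) := by omega
      subst hb
      rw [pv_contains_rowSet] at hbc
      simp only [Bool.and_eq_false_iff, decide_eq_false_iff_not, beq_eq_false_iff_ne] at hbc
      have hch : row.toList.getD c ' ' ≠ '^' := by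
        rcases hbc with h | h
        · omega
        · simpa using h
      exact Or.inl (Or.inl ⟨(hinv c hcw).mpr hbs, hch⟩)

lemma pv_dense (w : Nat) (rows : List String) (s : PySem.Set Int) (occ : List Bool) (t : Int)
    (hnd : s.Nodup)
    (hinv : ∀ c : Nat, c < w → (occ.getD c false = true ↔ (c : Int) ∈ s)) :
    (rows.foldl
        (fun (st : List Bool × Int) row =>
          ((List.range w).map (fun c =>
            (st.1.getD c false && !(row.toList.getD c ' ' == '^'))
            || (decide (0 < c) && st.1.getD (c - 1) false && (row.toList.getD (c - 1) ' ' == '^'))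
            || (decide (c + 1 < w) && st.1.getD (c + 1) false && (row.toList.getD (c + 1) ' ' == '^'))),
           (List.range w).foldl
            (fun (t : Int) c =>
              if st.1.getD c false && (row.toList.getD c ' ' == '^') then t + 1 else t)
            st.2))
        (occ, t)).2 =
      t + (pvCount (rows.map (pvRowSet w)) s) := by
  induction rows generalizing s occ t with
  | nil => simp [pvCount]
  | cons row rows ih =>
    rw [List.foldl_cons]
    dsimp only
    rw [PySem.List.foldl_if_add_one]
    rw [show (List.range w).map (fun c =>
            (occ.getD c false && !(row.toList.getD c ' ' == '^'))
            || (decide (0 < c) && occ.getD (c - 1) false && (row.toList.getD (c - 1) ' ' == '^'))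
            || (decide (c + 1 < w) && occ.getD (c + 1) false && (row.toList.getD (c + 1) ' ' == '^')))
        = pvOccRow w row occ from rfl]
    rw [ih _ _ _ (pv_nodup_step _ _) (pv_step_row w row s occ hinv)]
    rw [List.map_cons]
    show _ = t + ((s.countP (fun b => PySem.Set.contains (pvRowSet w row) b) : Int)
      + pvCount _ (pvStep (pvRowSet w row) s))
    rw [← pv_count_row w row s occ hnd hinv]
    ring

-- ===== VERDICT (by name: the statement is the Claim_ definition above) =====
theorem part_one_spec : Claim_equal_part_one := by
  intro input _ hpre
  unfold Spec_part_one
  cases h : PySem.Str.splitlines input with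
  | nil => simp [part_one, part_one_alt, h]
  | cons l0 rest =>
    simp only [part_one, part_one_alt, h]
    -- rewrite A's parse into the pair (pvSetA, pvStart)
    have hparseA :
        (List.foldl
          (fun (st : PySem.Set (Int × Int) × Option Int) i =>
            List.foldl
              (fun (st2 : PySem.Set (Int × Int) × Option Int) j =>
                if ((l0 :: rest).getD i "").toList.getD j ' ' = 'S' then (st2.1, some ((j : Int)))
                else
                  if ((l0 :: rest).getD i "").toList.getD j ' ' = '^' then
                    (PySem.Set.add st2.1 (((i : Int)), ((j : Int))), st2.2)
                  else st2)
              st (List.range l0.toList.length))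
          (PySem.Set.empty, none) (List.range (l0 :: rest).length)) =
        (pvSetA l0 rest, pvStart l0 rest) := by
      have key := PySem.List.foldl_congr_mem (l := List.range (l0 :: rest).length)
        (f := fun (st : PySem.Set (Int × Int) × Option Int) i =>
          List.foldl
            (fun (st2 : PySem.Set (Int × Int) × Option Int) j =>
              if ((l0 :: rest).getD i "").toList.getD j ' ' = 'S' then (st2.1, some ((j : Int)))
              else
                if ((l0 :: rest).getD i "").toList.getD j ' ' = '^' then
                  (PySem.Set.add st2.1 (((i : Int)), ((j : Int))), st2.2)
                else st2)
            st (List.range l0.toList.length))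
        (g := fun (st : PySem.Set (Int × Int) × Option Int) i =>
          (List.foldl
            (fun (s : PySem.Set (Int × Int)) j =>
              if pvChar l0 rest i j = '^' then PySem.Set.add s (((i : Int)), ((j : Int))) else s)
            st.1 (List.range l0.toList.length),
           List.foldl
            (fun (st : Option Int) j => if pvChar l0 rest i j = 'S' then some ((j : Int)) else st)
            st.2 (List.range l0.toList.length)))
        (init := ((PySem.Set.empty : PySem.Set (Int × Int)), (none : Option Int)))
        ?hc
      case hc =>
        intro st i _
        obtain ⟨s1, s2⟩ := st
        have hstep :
            (fun (st2 : PySem.Set (Int × Int) × Option Int) (j : Nat) =>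
              if ((l0 :: rest).getD i "").toList.getD j ' ' = 'S' then (st2.1, some ((j : Int)))
              else
                if ((l0 :: rest).getD i "").toList.getD j ' ' = '^' then
                  (PySem.Set.add st2.1 (((i : Int)), ((j : Int))), st2.2)
                else st2) =
            (fun (st2 : PySem.Set (Int × Int) × Option Int) (j : Nat) =>
              ((if pvChar l0 rest i j = '^' then PySem.Set.add st2.1 (((i : Int)), ((j : Int))) else st2.1),
               (if pvChar l0 rest i j = 'S' then some ((j : Int)) else st2.2))) := by
          funext st2 j
          by_cases hS : pvChar l0 rest i j = 'S' <;> by_cases hC : pvChar l0 rest i j = '^' <;>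
            simp_all [pvChar]
        dsimp only
        rw [hstep, PySem.List.foldl_prod_mk
          (f := fun (s : PySem.Set (Int × Int)) (j : Nat) =>
            if pvChar l0 rest i j = '^' then PySem.Set.add s (((i : Int)), ((j : Int))) else s)
          (g := fun (o : Option Int) (j : Nat) =>
            if pvChar l0 rest i j = 'S' then some ((j : Int)) else o)]
      rw [key]
      rw [PySem.List.foldl_prod_mk
        (f := fun (s : PySem.Set (Int × Int)) (i : Nat) =>
          List.foldl
            (fun (s : PySem.Set (Int × Int)) j =>
              if pvChar l0 rest i j = '^' then PySem.Set.add s (((i : Int)), ((j : Int))) else s)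
            s (List.range l0.toList.length))
        (g := fun (o : Option Int) (i : Nat) =>
          List.foldl
            (fun (o : Option Int) j => if pvChar l0 rest i j = 'S' then some ((j : Int)) else o)
            o (List.range l0.toList.length))]
      rfl
    rw [hparseA]
    -- B's start scan is pvStart as well
    have hstartB : pvStart l0 rest =
        (l0 :: rest).foldl
          (fun (o : Option Int) line =>
            List.foldl
              (fun (o : Option Int) (j : Nat) =>
                if line.toList.getD j ' ' = 'S' then some ((j : Int)) else o)
              o (List.range l0.toList.length))
          none :=
      pv_foldl_range_getD (l0 :: rest) ""
        (fun (o : Option Int) line =>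
          List.foldl
            (fun (o : Option Int) (j : Nat) =>
              if line.toList.getD j ' ' = 'S' then some ((j : Int)) else o)
            o (List.range l0.toList.length))
        none
    rw [← hstartB]
    dsimp only
    cases hstart : pvStart l0 rest with
    | none =>
      rw [pv_simA_none (PySem.List.pyRange 1 ((l0 :: rest).length : Int) 1)
        (fun i b => PySem.Set.contains (pvSetA l0 rest) (i, b)) 0]
    | some s0 =>
      dsimp only
      -- A side: replace the global splitter test by the per-row one
      have hcongrA := PySem.List.foldl_congr_mem
        (l := PySem.List.pyRange 1 ((l0 :: rest).length : Int) 1)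
        (f := fun (st : List (Option Int) × Int) (i : Int) =>
          ((st.1.foldl
            (fun (acc : PySem.Set (Option Int) × Int) beam =>
              match beam with
              | some b =>
                if PySem.Set.contains (pvSetA l0 rest) (i, b) then
                  (PySem.Set.add (PySem.Set.add acc.1 (some (b - 1))) (some (b + 1)), acc.2 + 1)
                else (PySem.Set.add acc.1 (some b), acc.2)
              | none => (PySem.Set.add acc.1 none, acc.2))
            (PySem.Set.empty, st.2)).1,
           (st.1.foldl
            (fun (acc : PySem.Set (Option Int) × Int) beam =>
              match beam with
              | some b =>
                if PySem.Set.contains (pvSetA l0 rest) (i, b) then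
                  (PySem.Set.add (PySem.Set.add acc.1 (some (b - 1))) (some (b + 1)), acc.2 + 1)
                else (PySem.Set.add acc.1 (some b), acc.2)
              | none => (PySem.Set.add acc.1 none, acc.2))
            (PySem.Set.empty, st.2)).2))
        (g := fun (st : List (Option Int) × Int) (i : Int) =>
          ((st.1.foldl
            (fun (acc : PySem.Set (Option Int) × Int) beam =>
              match beam with
              | some b =>
                if PySem.Set.contains
                    (pvRowSet l0.toList.length (PySem.List.pyGetD (l0 :: rest) i "")) b then
                  (PySem.Set.add (PySem.Set.add acc.1 (some (b - 1))) (some (b + 1)), acc.2 + 1)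
                else (PySem.Set.add acc.1 (some b), acc.2)
              | none => (PySem.Set.add acc.1 none, acc.2))
            (PySem.Set.empty, st.2)).1,
           (st.1.foldl
            (fun (acc : PySem.Set (Option Int) × Int) beam =>
              match beam with
              | some b =>
                if PySem.Set.contains
                    (pvRowSet l0.toList.length (PySem.List.pyGetD (l0 :: rest) i "")) b then
                  (PySem.Set.add (PySem.Set.add acc.1 (some (b - 1))) (some (b + 1)), acc.2 + 1)
                else (PySem.Set.add acc.1 (some b), acc.2)
              | none => (PySem.Set.add acc.1 none, acc.2))
            (PySem.Set.empty, st.2)).2))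
        (init := (([some s0] : List (Option Int)), (0 : Int)))
        ?hca
      case hca =>
        intro st i hi
        obtain ⟨h1, h2⟩ := (PySem.List.mem_pyRange_one).mp hi
        have hfun :
            (fun (acc : PySem.Set (Option Int) × Int) (beam : Option Int) =>
              match beam with
              | some b =>
                if PySem.Set.contains (pvSetA l0 rest) (i, b) then
                  (PySem.Set.add (PySem.Set.add acc.1 (some (b - 1))) (some (b + 1)), acc.2 + 1)
                else (PySem.Set.add acc.1 (some b), acc.2)
              | none => (PySem.Set.add acc.1 none, acc.2)) =
            (fun (acc : PySem.Set (Option Int) × Int) (beam : Option Int) =>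
              match beam with
              | some b =>
                if PySem.Set.contains
                    (pvRowSet l0.toList.length (PySem.List.pyGetD (l0 :: rest) i "")) b then
                  (PySem.Set.add (PySem.Set.add acc.1 (some (b - 1))) (some (b + 1)), acc.2 + 1)
                else (PySem.Set.add acc.1 (some b), acc.2)
              | none => (PySem.Set.add acc.1 none, acc.2)) := by
          funext acc beam
          cases beam with
          | none => rfl
          | some b =>
            dsimp only
            rw [PySem.List.pyGetD_of_nonneg (l0 :: rest) "" (by omega : (0:Int) ≤ i)]
            rw [pv_pred_eq l0 rest i h1 h2 b]
        dsimp only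
        rw [hfun]
      rw [hcongrA]
      rw [PySem.List.foldl_pyRange_pyGetD' (l0 :: rest) ""
        (fun (st : List (Option Int) × Int) line =>
          ((st.1.foldl
            (fun (acc : PySem.Set (Option Int) × Int) beam =>
              match beam with
              | some b =>
                if PySem.Set.contains (pvRowSet l0.toList.length line) b then
                  (PySem.Set.add (PySem.Set.add acc.1 (some (b - 1))) (some (b + 1)), acc.2 + 1)
                else (PySem.Set.add acc.1 (some b), acc.2)
              | none => (PySem.Set.add acc.1 none, acc.2))
            (PySem.Set.empty, st.2)).1,
           (st.1.foldl
            (fun (acc : PySem.Set (Option Int) × Int) beam =>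
              match beam with
              | some b =>
                if PySem.Set.contains (pvRowSet l0.toList.length line) b then
                  (PySem.Set.add (PySem.Set.add acc.1 (some (b - 1))) (some (b + 1)), acc.2 + 1)
                else (PySem.Set.add acc.1 (some b), acc.2)
              | none => (PySem.Set.add acc.1 none, acc.2))
            (PySem.Set.empty, st.2)).2))
        (([some s0] : List (Option Int)), (0 : Int)) (by omega)]
      rw [show List.drop (Int.toNat 1) (l0 :: rest) = rest from rfl]
      rw [← List.foldl_map (f := pvRowSet l0.toList.length)
        (g := fun (st : List (Option Int) × Int) (sp : PySem.Set Int) =>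
          ((st.1.foldl
            (fun (acc : PySem.Set (Option Int) × Int) beam =>
              match beam with
              | some b =>
                if PySem.Set.contains sp b then
                  (PySem.Set.add (PySem.Set.add acc.1 (some (b - 1))) (some (b + 1)), acc.2 + 1)
                else (PySem.Set.add acc.1 (some b), acc.2)
              | none => (PySem.Set.add acc.1 none, acc.2))
            (PySem.Set.empty, st.2)).1,
           (st.1.foldl
            (fun (acc : PySem.Set (Option Int) × Int) beam =>
              match beam with
              | some b =>
                if PySem.Set.contains sp b then
                  (PySem.Set.add (PySem.Set.add acc.1 (some (b - 1))) (some (b + 1)), acc.2 + 1)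
                else (PySem.Set.add acc.1 (some b), acc.2)
              | none => (PySem.Set.add acc.1 none, acc.2))
            (PySem.Set.empty, st.2)).2))
        (l := rest) (init := (([some s0] : List (Option Int)), (0 : Int)))]
      rw [show (([some s0] : List (Option Int)), (0 : Int)) =
          ((List.map some (PySem.Set.ofList [s0] : PySem.Set Int) : List (Option Int)), (0 : Int)) from rfl]
      rw [pv_simA]
      -- B side: the dense DP computes the same pvCount
      rw [pv_dense l0.toList.length rest (PySem.Set.ofList [s0])
        ((List.range l0.toList.length).map (fun (c : Nat) => decide ((c : Int) = s0))) 0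
        (PySem.Set.nodup_ofList _)
        (by
          intro c hcw
          rw [PySem.List.getD_map_range _ _ _ _ hcw]
          rw [PySem.Set.mem_ofList]
          simp)]
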